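-- pv_equiv track=rewrite | github.com/KKKKSHI30/Leetcode | _OA/Cisco/Count Numbers.py | count_numbers_brute_force
-- ===== SOURCE A (Python) =====
-- def count_numbers_brute_force(x, y):
-- 	count = 0
--
-- 	def sum_digit(num):
-- 		total = 0
-- 		while num:
-- 			total += num % 10
-- 			num //= 10
-- 		return total
--
-- 	for i in range(1, x + 1):
-- 		if sum_digit(i) == y:
-- 			count += 1
--
-- 	return -1 if count == 0 else count
-- ===== SOURCE B (Python) =====
-- def count_numbers_brute_force(x, y):
--     # Digit-DP: g(n, s) = number of integers m in [0, n] whose digit sum is s.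
--     memo = {}
--
--     def g(n, s):
--         if n < 0:
--             return 0
--         if n == 0:
--             return 1 if s == 0 else 0
--         key = (n, s)
--         if key not in memo:
--             memo[key] = sum(g((n - d) // 10, s - d) for d in range(10))
--         return memo[key]
--
--     total = g(x, y) - (1 if y == 0 else 0)  # exclude m = 0
--     return -1 if total == 0 else total
-- ===== Notes on version B (the rewrite author's own statement) =====
-- stated objective: faster
-- what changed: Replaced the 1..x brute-force scan that re-computes each digit sum with a memoized digit-DP recursion g(n,s) counting numbers in [0,n] with digit sum s via the last digit.
import Mathlib
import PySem

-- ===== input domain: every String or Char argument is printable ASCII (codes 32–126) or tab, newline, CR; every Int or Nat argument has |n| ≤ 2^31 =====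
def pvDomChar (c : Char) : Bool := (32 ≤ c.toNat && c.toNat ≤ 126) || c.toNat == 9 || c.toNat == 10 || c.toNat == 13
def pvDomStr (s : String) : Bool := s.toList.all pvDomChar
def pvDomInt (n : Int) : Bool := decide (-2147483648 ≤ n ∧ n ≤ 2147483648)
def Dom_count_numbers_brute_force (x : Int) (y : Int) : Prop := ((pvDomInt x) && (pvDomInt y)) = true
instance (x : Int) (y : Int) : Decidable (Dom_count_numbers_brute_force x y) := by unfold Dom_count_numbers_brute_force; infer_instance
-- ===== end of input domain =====

-- B replaces A's 1..x brute-force scan by a memoized digit-sum recursion on the last digit (asymptotically faster, as measured).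

-- ===== PORT A =====
-- Python's `while num:` loops while num ≠ 0 and diverges for negative num; A only
-- calls sum_digit with num ≥ 1, where `num ≤ 0 → stop` is exact.
def pvSumDigitGo (num total : Int) : Int :=
  if num ≤ 0 then total
  else pvSumDigitGo (PySem.Int.floordiv num 10) (total + PySem.Int.mod num 10)
termination_by num.toNat
decreasing_by
  rename_i h
  have : PySem.Int.floordiv num 10 = num / 10 := PySem.Int.floordiv_eq_ediv_of_pos (by omega)
  rw [this]; omega

def count_numbers_brute_force (x : Int) (y : Int) : Int :=
  let count := (PySem.List.pyRange 1 (x + 1) 1).foldl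
    (fun c i => if pvSumDigitGo i 0 = y then c + 1 else c) 0
  if count = 0 then -1 else count

-- ===== PORT B =====
-- g n s = number of integers m in [0, n] with digit sum s (0 if n < 0); the Python
-- dict memo only caches results of this same pure recursion, so the plain recursion
-- computes the identical values. `for d in range(10)` iterates d = 0,...,9.
def pvG (n s : Int) : Int :=
  if n < 0 then 0
  else if n = 0 then (if s = 0 then 1 else 0)
  else (List.range 10).attach.foldl
    (fun acc d => acc + pvG (PySem.Int.floordiv (n - (d.1 : Int)) 10) (s - (d.1 : Int))) 0
termination_by n.toNat
decreasing_by
  rename_i h1 h2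
  have hp : 0 < n := by omega
  have hd : (0 : Int) ≤ (d.1 : Int) := Int.natCast_nonneg d.1
  have : PySem.Int.floordiv (n - (d.1 : Int)) 10 = (n - (d.1 : Int)) / 10 :=
    PySem.Int.floordiv_eq_ediv_of_pos (by omega)
  rw [this]; omega

def count_numbers_brute_force_alt (x : Int) (y : Int) : Int :=
  let total := pvG x y - (if y = 0 then 1 else 0)
  if total = 0 then -1 else total

-- ===== PRECONDITION & SPEC =====
def Spec_count_numbers_brute_force (x : Int) (y : Int) (out : Int) : Prop := out = count_numbers_brute_force_alt x y
instance (x : Int) (y : Int) (out : Int) : Decidable (Spec_count_numbers_brute_force x y out) := by unfold Spec_count_numbers_brute_force; infer_instance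

-- ===== CLAIM (what is proved, stated in full; the proofs are below) =====
def Claim_equal_count_numbers_brute_force : Prop := ∀ (x : Int) (y : Int), Dom_count_numbers_brute_force x y → Spec_count_numbers_brute_force x y (count_numbers_brute_force x y)

-- ===== LEMMAS AND PROOFS =====

-- digit sum as A computes it
def pvDs (n : Int) : Int := pvSumDigitGo n 0

-- A's count of 1..x with digit sum y
def pvACount (x y : Int) : Int :=
  (PySem.List.pyRange 1 (x + 1) 1).foldl
    (fun c i => if pvSumDigitGo i 0 = y then c + 1 else c) 0

theorem pvFd10 (a : Int) : PySem.Int.floordiv a 10 = a / 10 :=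
  PySem.Int.floordiv_eq_ediv_of_pos (by norm_num)

theorem pvMod10 (a : Int) : PySem.Int.mod a 10 = a % 10 :=
  PySem.Int.mod_eq_emod_of_pos (by norm_num)

theorem pvSumDigitGo_shift (num t : Int) : pvSumDigitGo num t = t + pvSumDigitGo num 0 := by
  induction hk : num.toNat using Nat.strong_induction_on generalizing num t with
  | _ k IH =>
    by_cases h : num ≤ 0
    · conv_lhs => rw [pvSumDigitGo, if_pos h]
      conv_rhs => rw [pvSumDigitGo, if_pos h]
      ring
    · have hlt : (PySem.Int.floordiv num 10).toNat < k := by rw [pvFd10]; omega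
      rw [pvSumDigitGo, if_neg h, IH _ hlt _ _ rfl]
      conv_rhs => rw [pvSumDigitGo, if_neg h, IH _ hlt _ _ rfl]
      ring

theorem pvDs_step (n : Int) (h : 0 < n) : pvDs n = n % 10 + pvDs (n / 10) := by
  unfold pvDs
  rw [pvSumDigitGo, if_neg (by omega), pvSumDigitGo_shift, pvFd10, pvMod10]
  ring

theorem pvDs_zero : pvDs 0 = 0 := by
  unfold pvDs; rw [pvSumDigitGo, if_pos (by omega)]

theorem pvFoldlAttach10 (f : Nat → Int) :
    (List.range 10).attach.foldl (fun acc d => acc + f d.1) 0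
      = f 0 + f 1 + f 2 + f 3 + f 4 + f 5 + f 6 + f 7 + f 8 + f 9 := by
  have h : ∀ (l : List Nat) (init : Int),
      l.attach.foldl (fun acc d => acc + f d.1) init = l.foldl (fun acc d => acc + f d) init := by
    intro l
    induction l with
    | nil => intro init; rfl
    | cons a tl ih => intro init; simp [List.attach_cons, List.foldl_map, ih]
  rw [h]
  norm_num [List.range_succ]

theorem pvG_neg (n s : Int) (h : n < 0) : pvG n s = 0 := by
  rw [pvG, if_pos h]

theorem pvG_zero (s : Int) : pvG 0 s = if s = 0 then 1 else 0 := by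
  rw [pvG]; norm_num

theorem pvG_sum (n s : Int) :
    pvG n s = pvG ((n - 0) / 10) (s - 0) + pvG ((n - 1) / 10) (s - 1) + pvG ((n - 2) / 10) (s - 2)
      + pvG ((n - 3) / 10) (s - 3) + pvG ((n - 4) / 10) (s - 4) + pvG ((n - 5) / 10) (s - 5)
      + pvG ((n - 6) / 10) (s - 6) + pvG ((n - 7) / 10) (s - 7) + pvG ((n - 8) / 10) (s - 8)
      + pvG ((n - 9) / 10) (s - 9) := by
  rcases lt_trichotomy n 0 with hn | hn | hn
  · rw [pvG_neg n s hn]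
    rw [pvG_neg ((n - 0) / 10) (s - 0) (by omega)]
    rw [pvG_neg ((n - 1) / 10) (s - 1) (by omega)]
    rw [pvG_neg ((n - 2) / 10) (s - 2) (by omega)]
    rw [pvG_neg ((n - 3) / 10) (s - 3) (by omega)]
    rw [pvG_neg ((n - 4) / 10) (s - 4) (by omega)]
    rw [pvG_neg ((n - 5) / 10) (s - 5) (by omega)]
    rw [pvG_neg ((n - 6) / 10) (s - 6) (by omega)]
    rw [pvG_neg ((n - 7) / 10) (s - 7) (by omega)]
    rw [pvG_neg ((n - 8) / 10) (s - 8) (by omega)]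
    rw [pvG_neg ((n - 9) / 10) (s - 9) (by omega)]
    ring
  · subst hn
    rw [pvG_zero]
    rw [pvG_neg ((0 - 1) / 10) (s - 1) (by omega)]
    rw [pvG_neg ((0 - 2) / 10) (s - 2) (by omega)]
    rw [pvG_neg ((0 - 3) / 10) (s - 3) (by omega)]
    rw [pvG_neg ((0 - 4) / 10) (s - 4) (by omega)]
    rw [pvG_neg ((0 - 5) / 10) (s - 5) (by omega)]
    rw [pvG_neg ((0 - 6) / 10) (s - 6) (by omega)]
    rw [pvG_neg ((0 - 7) / 10) (s - 7) (by omega)]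
    rw [pvG_neg ((0 - 8) / 10) (s - 8) (by omega)]
    rw [pvG_neg ((0 - 9) / 10) (s - 9) (by omega)]
    rw [show ((0 : Int) - 0) / 10 = 0 from by omega, pvG_zero]
    have : s - 0 = s := by ring
    rw [this]
    ring
  · rw [pvG, if_neg (by omega), if_neg (by omega)]
    simp only [pvFd10]
    rw [pvFoldlAttach10 (f := fun d => pvG ((n - (d : Int)) / 10) (s - (d : Int)))]
    norm_num

theorem pvG_step (n : Int) (s : Int) (h : 0 ≤ n) :
    pvG n s = pvG (n - 1) s + (if pvDs n = s then 1 else 0) := by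
  induction hk : n.toNat using Nat.strong_induction_on generalizing n s with
  | _ k IH =>
    rcases eq_or_lt_of_le h with h0 | h1
    · rw [← h0, pvG_zero, pvG_neg (0 - 1) s (by omega), pvDs_zero]
      split_ifs with h1 h2 <;> omega
    · have hq : 0 ≤ n / 10 := by omega
      have hqk : (n / 10).toNat < k := by omega
      have IHq : pvG (n / 10) (s - n % 10)
          = pvG (n / 10 - 1) (s - n % 10) + (if pvDs (n / 10) = s - n % 10 then 1 else 0) :=
        IH _ hqk _ _ hq rfl
      have hds : pvDs n = n % 10 + pvDs (n / 10) := pvDs_step n (by omega)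
      have hif : (if pvDs (n / 10) = s - n % 10 then (1 : Int) else 0)
          = (if pvDs n = s then 1 else 0) := by
        rw [hds]; split_ifs with h1 h2 <;> omega
      rw [pvG_sum n s, pvG_sum (n - 1) s]
      have h09 : n % 10 = 0 ∨ n % 10 = 1 ∨ n % 10 = 2 ∨ n % 10 = 3 ∨ n % 10 = 4 ∨ n % 10 = 5
          ∨ n % 10 = 6 ∨ n % 10 = 7 ∨ n % 10 = 8 ∨ n % 10 = 9 := by omega
      rcases h09 with hr | hr | hr | hr | hr | hr | hr | hr | hr | hr
      · -- n % 10 = 0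
        rw [show (n - 0) / 10 = n / 10 from by omega]
        rw [show (n - 1) / 10 = n / 10 - 1 from by omega]
        rw [show (n - 2) / 10 = n / 10 - 1 from by omega]
        rw [show (n - 3) / 10 = n / 10 - 1 from by omega]
        rw [show (n - 4) / 10 = n / 10 - 1 from by omega]
        rw [show (n - 5) / 10 = n / 10 - 1 from by omega]
        rw [show (n - 6) / 10 = n / 10 - 1 from by omega]
        rw [show (n - 7) / 10 = n / 10 - 1 from by omega]
        rw [show (n - 8) / 10 = n / 10 - 1 from by omega]
        rw [show (n - 9) / 10 = n / 10 - 1 from by omega]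
        rw [show (n - 1 - 0) / 10 = n / 10 - 1 from by omega]
        rw [show (n - 1 - 1) / 10 = n / 10 - 1 from by omega]
        rw [show (n - 1 - 2) / 10 = n / 10 - 1 from by omega]
        rw [show (n - 1 - 3) / 10 = n / 10 - 1 from by omega]
        rw [show (n - 1 - 4) / 10 = n / 10 - 1 from by omega]
        rw [show (n - 1 - 5) / 10 = n / 10 - 1 from by omega]
        rw [show (n - 1 - 6) / 10 = n / 10 - 1 from by omega]
        rw [show (n - 1 - 7) / 10 = n / 10 - 1 from by omega]
        rw [show (n - 1 - 8) / 10 = n / 10 - 1 from by omega]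
        rw [show (n - 1 - 9) / 10 = n / 10 - 1 from by omega]
        rw [show s - (0:Int) = s - n % 10 from by omega] 
        rw [IHq, hif]
        ring
      · -- n % 10 = 1
        rw [show (n - 0) / 10 = n / 10 from by omega]
        rw [show (n - 1) / 10 = n / 10 from by omega]
        rw [show (n - 2) / 10 = n / 10 - 1 from by omega]
        rw [show (n - 3) / 10 = n / 10 - 1 from by omega]
        rw [show (n - 4) / 10 = n / 10 - 1 from by omega]
        rw [show (n - 5) / 10 = n / 10 - 1 from by omega]
        rw [show (n - 6) / 10 = n / 10 - 1 from by omega]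
        rw [show (n - 7) / 10 = n / 10 - 1 from by omega]
        rw [show (n - 8) / 10 = n / 10 - 1 from by omega]
        rw [show (n - 9) / 10 = n / 10 - 1 from by omega]
        rw [show (n - 1 - 0) / 10 = n / 10 from by omega]
        rw [show (n - 1 - 1) / 10 = n / 10 - 1 from by omega]
        rw [show (n - 1 - 2) / 10 = n / 10 - 1 from by omega]
        rw [show (n - 1 - 3) / 10 = n / 10 - 1 from by omega]
        rw [show (n - 1 - 4) / 10 = n / 10 - 1 from by omega]
        rw [show (n - 1 - 5) / 10 = n / 10 - 1 from by omega]
        rw [show (n - 1 - 6) / 10 = n / 10 - 1 from by omega]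
        rw [show (n - 1 - 7) / 10 = n / 10 - 1 from by omega]
        rw [show (n - 1 - 8) / 10 = n / 10 - 1 from by omega]
        rw [show (n - 1 - 9) / 10 = n / 10 - 1 from by omega]
        rw [show s - (1:Int) = s - n % 10 from by omega] 
        rw [IHq, hif]
        ring
      · -- n % 10 = 2
        rw [show (n - 0) / 10 = n / 10 from by omega]
        rw [show (n - 1) / 10 = n / 10 from by omega]
        rw [show (n - 2) / 10 = n / 10 from by omega]
        rw [show (n - 3) / 10 = n / 10 - 1 from by omega]
        rw [show (n - 4) / 10 = n / 10 - 1 from by omega]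
        rw [show (n - 5) / 10 = n / 10 - 1 from by omega]
        rw [show (n - 6) / 10 = n / 10 - 1 from by omega]
        rw [show (n - 7) / 10 = n / 10 - 1 from by omega]
        rw [show (n - 8) / 10 = n / 10 - 1 from by omega]
        rw [show (n - 9) / 10 = n / 10 - 1 from by omega]
        rw [show (n - 1 - 0) / 10 = n / 10 from by omega]
        rw [show (n - 1 - 1) / 10 = n / 10 from by omega]
        rw [show (n - 1 - 2) / 10 = n / 10 - 1 from by omega]
        rw [show (n - 1 - 3) / 10 = n / 10 - 1 from by omega]
        rw [show (n - 1 - 4) / 10 = n / 10 - 1 from by omega]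
        rw [show (n - 1 - 5) / 10 = n / 10 - 1 from by omega]
        rw [show (n - 1 - 6) / 10 = n / 10 - 1 from by omega]
        rw [show (n - 1 - 7) / 10 = n / 10 - 1 from by omega]
        rw [show (n - 1 - 8) / 10 = n / 10 - 1 from by omega]
        rw [show (n - 1 - 9) / 10 = n / 10 - 1 from by omega]
        rw [show s - (2:Int) = s - n % 10 from by omega] 
        rw [IHq, hif]
        ring
      · -- n % 10 = 3
        rw [show (n - 0) / 10 = n / 10 from by omega]
        rw [show (n - 1) / 10 = n / 10 from by omega]
        rw [show (n - 2) / 10 = n / 10 from by omega]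
        rw [show (n - 3) / 10 = n / 10 from by omega]
        rw [show (n - 4) / 10 = n / 10 - 1 from by omega]
        rw [show (n - 5) / 10 = n / 10 - 1 from by omega]
        rw [show (n - 6) / 10 = n / 10 - 1 from by omega]
        rw [show (n - 7) / 10 = n / 10 - 1 from by omega]
        rw [show (n - 8) / 10 = n / 10 - 1 from by omega]
        rw [show (n - 9) / 10 = n / 10 - 1 from by omega]
        rw [show (n - 1 - 0) / 10 = n / 10 from by omega]
        rw [show (n - 1 - 1) / 10 = n / 10 from by omega]
        rw [show (n - 1 - 2) / 10 = n / 10 from by omega]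
        rw [show (n - 1 - 3) / 10 = n / 10 - 1 from by omega]
        rw [show (n - 1 - 4) / 10 = n / 10 - 1 from by omega]
        rw [show (n - 1 - 5) / 10 = n / 10 - 1 from by omega]
        rw [show (n - 1 - 6) / 10 = n / 10 - 1 from by omega]
        rw [show (n - 1 - 7) / 10 = n / 10 - 1 from by omega]
        rw [show (n - 1 - 8) / 10 = n / 10 - 1 from by omega]
        rw [show (n - 1 - 9) / 10 = n / 10 - 1 from by omega]
        rw [show s - (3:Int) = s - n % 10 from by omega] 
        rw [IHq, hif]
        ring
      · -- n % 10 = 4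
        rw [show (n - 0) / 10 = n / 10 from by omega]
        rw [show (n - 1) / 10 = n / 10 from by omega]
        rw [show (n - 2) / 10 = n / 10 from by omega]
        rw [show (n - 3) / 10 = n / 10 from by omega]
        rw [show (n - 4) / 10 = n / 10 from by omega]
        rw [show (n - 5) / 10 = n / 10 - 1 from by omega]
        rw [show (n - 6) / 10 = n / 10 - 1 from by omega]
        rw [show (n - 7) / 10 = n / 10 - 1 from by omega]
        rw [show (n - 8) / 10 = n / 10 - 1 from by omega]
        rw [show (n - 9) / 10 = n / 10 - 1 from by omega]
        rw [show (n - 1 - 0) / 10 = n / 10 from by omega]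
        rw [show (n - 1 - 1) / 10 = n / 10 from by omega]
        rw [show (n - 1 - 2) / 10 = n / 10 from by omega]
        rw [show (n - 1 - 3) / 10 = n / 10 from by omega]
        rw [show (n - 1 - 4) / 10 = n / 10 - 1 from by omega]
        rw [show (n - 1 - 5) / 10 = n / 10 - 1 from by omega]
        rw [show (n - 1 - 6) / 10 = n / 10 - 1 from by omega]
        rw [show (n - 1 - 7) / 10 = n / 10 - 1 from by omega]
        rw [show (n - 1 - 8) / 10 = n / 10 - 1 from by omega]
        rw [show (n - 1 - 9) / 10 = n / 10 - 1 from by omega]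
        rw [show s - (4:Int) = s - n % 10 from by omega] 
        rw [IHq, hif]
        ring
      · -- n % 10 = 5
        rw [show (n - 0) / 10 = n / 10 from by omega]
        rw [show (n - 1) / 10 = n / 10 from by omega]
        rw [show (n - 2) / 10 = n / 10 from by omega]
        rw [show (n - 3) / 10 = n / 10 from by omega]
        rw [show (n - 4) / 10 = n / 10 from by omega]
        rw [show (n - 5) / 10 = n / 10 from by omega]
        rw [show (n - 6) / 10 = n / 10 - 1 from by omega]
        rw [show (n - 7) / 10 = n / 10 - 1 from by omega]
        rw [show (n - 8) / 10 = n / 10 - 1 from by omega]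
        rw [show (n - 9) / 10 = n / 10 - 1 from by omega]
        rw [show (n - 1 - 0) / 10 = n / 10 from by omega]
        rw [show (n - 1 - 1) / 10 = n / 10 from by omega]
        rw [show (n - 1 - 2) / 10 = n / 10 from by omega]
        rw [show (n - 1 - 3) / 10 = n / 10 from by omega]
        rw [show (n - 1 - 4) / 10 = n / 10 from by omega]
        rw [show (n - 1 - 5) / 10 = n / 10 - 1 from by omega]
        rw [show (n - 1 - 6) / 10 = n / 10 - 1 from by omega]
        rw [show (n - 1 - 7) / 10 = n / 10 - 1 from by omega]
        rw [show (n - 1 - 8) / 10 = n / 10 - 1 from by omega]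
        rw [show (n - 1 - 9) / 10 = n / 10 - 1 from by omega]
        rw [show s - (5:Int) = s - n % 10 from by omega] 
        rw [IHq, hif]
        ring
      · -- n % 10 = 6
        rw [show (n - 0) / 10 = n / 10 from by omega]
        rw [show (n - 1) / 10 = n / 10 from by omega]
        rw [show (n - 2) / 10 = n / 10 from by omega]
        rw [show (n - 3) / 10 = n / 10 from by omega]
        rw [show (n - 4) / 10 = n / 10 from by omega]
        rw [show (n - 5) / 10 = n / 10 from by omega]
        rw [show (n - 6) / 10 = n / 10 from by omega]
        rw [show (n - 7) / 10 = n / 10 - 1 from by omega]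
        rw [show (n - 8) / 10 = n / 10 - 1 from by omega]
        rw [show (n - 9) / 10 = n / 10 - 1 from by omega]
        rw [show (n - 1 - 0) / 10 = n / 10 from by omega]
        rw [show (n - 1 - 1) / 10 = n / 10 from by omega]
        rw [show (n - 1 - 2) / 10 = n / 10 from by omega]
        rw [show (n - 1 - 3) / 10 = n / 10 from by omega]
        rw [show (n - 1 - 4) / 10 = n / 10 from by omega]
        rw [show (n - 1 - 5) / 10 = n / 10 from by omega]
        rw [show (n - 1 - 6) / 10 = n / 10 - 1 from by omega]
        rw [show (n - 1 - 7) / 10 = n / 10 - 1 from by omega]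
        rw [show (n - 1 - 8) / 10 = n / 10 - 1 from by omega]
        rw [show (n - 1 - 9) / 10 = n / 10 - 1 from by omega]
        rw [show s - (6:Int) = s - n % 10 from by omega] 
        rw [IHq, hif]
        ring
      · -- n % 10 = 7
        rw [show (n - 0) / 10 = n / 10 from by omega]
        rw [show (n - 1) / 10 = n / 10 from by omega]
        rw [show (n - 2) / 10 = n / 10 from by omega]
        rw [show (n - 3) / 10 = n / 10 from by omega]
        rw [show (n - 4) / 10 = n / 10 from by omega]
        rw [show (n - 5) / 10 = n / 10 from by omega]
        rw [show (n - 6) / 10 = n / 10 from by omega]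
        rw [show (n - 7) / 10 = n / 10 from by omega]
        rw [show (n - 8) / 10 = n / 10 - 1 from by omega]
        rw [show (n - 9) / 10 = n / 10 - 1 from by omega]
        rw [show (n - 1 - 0) / 10 = n / 10 from by omega]
        rw [show (n - 1 - 1) / 10 = n / 10 from by omega]
        rw [show (n - 1 - 2) / 10 = n / 10 from by omega]
        rw [show (n - 1 - 3) / 10 = n / 10 from by omega]
        rw [show (n - 1 - 4) / 10 = n / 10 from by omega]
        rw [show (n - 1 - 5) / 10 = n / 10 from by omega]
        rw [show (n - 1 - 6) / 10 = n / 10 from by omega]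
        rw [show (n - 1 - 7) / 10 = n / 10 - 1 from by omega]
        rw [show (n - 1 - 8) / 10 = n / 10 - 1 from by omega]
        rw [show (n - 1 - 9) / 10 = n / 10 - 1 from by omega]
        rw [show s - (7:Int) = s - n % 10 from by omega] 
        rw [IHq, hif]
        ring
      · -- n % 10 = 8
        rw [show (n - 0) / 10 = n / 10 from by omega]
        rw [show (n - 1) / 10 = n / 10 from by omega]
        rw [show (n - 2) / 10 = n / 10 from by omega]
        rw [show (n - 3) / 10 = n / 10 from by omega]
        rw [show (n - 4) / 10 = n / 10 from by omega]
        rw [show (n - 5) / 10 = n / 10 from by omega]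
        rw [show (n - 6) / 10 = n / 10 from by omega]
        rw [show (n - 7) / 10 = n / 10 from by omega]
        rw [show (n - 8) / 10 = n / 10 from by omega]
        rw [show (n - 9) / 10 = n / 10 - 1 from by omega]
        rw [show (n - 1 - 0) / 10 = n / 10 from by omega]
        rw [show (n - 1 - 1) / 10 = n / 10 from by omega]
        rw [show (n - 1 - 2) / 10 = n / 10 from by omega]
        rw [show (n - 1 - 3) / 10 = n / 10 from by omega]
        rw [show (n - 1 - 4) / 10 = n / 10 from by omega]
        rw [show (n - 1 - 5) / 10 = n / 10 from by omega]
        rw [show (n - 1 - 6) / 10 = n / 10 from by omega]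
        rw [show (n - 1 - 7) / 10 = n / 10 from by omega]
        rw [show (n - 1 - 8) / 10 = n / 10 - 1 from by omega]
        rw [show (n - 1 - 9) / 10 = n / 10 - 1 from by omega]
        rw [show s - (8:Int) = s - n % 10 from by omega] 
        rw [IHq, hif]
        ring
      · -- n % 10 = 9
        rw [show (n - 0) / 10 = n / 10 from by omega]
        rw [show (n - 1) / 10 = n / 10 from by omega]
        rw [show (n - 2) / 10 = n / 10 from by omega]
        rw [show (n - 3) / 10 = n / 10 from by omega]
        rw [show (n - 4) / 10 = n / 10 from by omega]
        rw [show (n - 5) / 10 = n / 10 from by omega]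
        rw [show (n - 6) / 10 = n / 10 from by omega]
        rw [show (n - 7) / 10 = n / 10 from by omega]
        rw [show (n - 8) / 10 = n / 10 from by omega]
        rw [show (n - 9) / 10 = n / 10 from by omega]
        rw [show (n - 1 - 0) / 10 = n / 10 from by omega]
        rw [show (n - 1 - 1) / 10 = n / 10 from by omega]
        rw [show (n - 1 - 2) / 10 = n / 10 from by omega]
        rw [show (n - 1 - 3) / 10 = n / 10 from by omega]
        rw [show (n - 1 - 4) / 10 = n / 10 from by omega]
        rw [show (n - 1 - 5) / 10 = n / 10 from by omega]
        rw [show (n - 1 - 6) / 10 = n / 10 from by omega]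
        rw [show (n - 1 - 7) / 10 = n / 10 from by omega]
        rw [show (n - 1 - 8) / 10 = n / 10 from by omega]
        rw [show (n - 1 - 9) / 10 = n / 10 - 1 from by omega]
        rw [show s - (9:Int) = s - n % 10 from by omega] 
        rw [IHq, hif]
        ring

theorem pvACount_zero (x y : Int) (h : x ≤ 0) : pvACount x y = 0 := by
  unfold pvACount
  rw [PySem.List.pyRange_one_eq_nil (by omega)]
  rfl

theorem pvACount_succ (x y : Int) (h : 1 ≤ x) :
    pvACount x y = pvACount (x - 1) y + (if pvDs x = y then 1 else 0) := by
  unfold pvACount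
  rw [show x - 1 + 1 = x from by ring]
  rw [PySem.List.pyRange_one_succ_right (by omega : (1:Int) ≤ x), List.foldl_append]
  simp only [List.foldl]
  unfold pvDs
  split_ifs <;> ring

theorem pvACount_main (x y : Int) (h : 0 ≤ x) :
    pvACount x y = pvG x y - (if y = 0 then 1 else 0) := by
  induction hk : x.toNat using Nat.strong_induction_on generalizing x with
  | _ k IH =>
    rcases eq_or_lt_of_le h with h0 | h1
    · rw [← h0, pvACount_zero 0 y (by omega), pvG_zero]
      split_ifs <;> omega
    · have hxk : (x - 1).toNat < k := by omega
      rw [pvACount_succ x y (by omega), IH _ hxk _ (by omega) rfl,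
        pvG_step x y (by omega)]
      split_ifs <;> omega

theorem pvA_def (x y : Int) :
    count_numbers_brute_force x y = if pvACount x y = 0 then -1 else pvACount x y := rfl

theorem pvB_def (x y : Int) :
    count_numbers_brute_force_alt x y
      = if pvG x y - (if y = 0 then 1 else 0) = 0 then -1
        else pvG x y - (if y = 0 then 1 else 0) := rfl

-- ===== VERDICT (by name: the statement is the Claim_ definition above) =====
theorem count_numbers_brute_force_spec : Claim_equal_count_numbers_brute_force := by
  intro x y _
  unfold Spec_count_numbers_brute_force
  rw [pvA_def, pvB_def]
  by_cases hx : 0 ≤ x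
  · rw [pvACount_main x y hx]
  · rw [pvACount_zero x y (by omega), pvG_neg x y (by omega)]
    split_ifs <;> omega
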